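-- pv_equiv track=rewrite | github.com/rosekc/acm | contest/2018/lanqiao1/3.py | check
-- ===== SOURCE A (Python) =====
-- def check(i):
--     s = str(i)
--     ok = True
--     f = True
--     for j in range(1, len(s)):
--         if s[j - 1] > s[j]:
--             if not f:
--                 ok = False
--                 break
--         elif s[j - 1] < s[j]:
--             if f and j != 1:
--                 f = False
--             elif j == 1:
--                 ok = False
--                 break
--         else:
--             ok = False
--             break
--     return ok and not f
-- ===== SOURCE B (Python) =====
-- def check(i):
--     # Declarative: build the list of rise/fall comparisons, then test that it
--     # equals the canonical valley pattern (d falls followed by rises), with no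
--     # equal adjacent characters, at least one fall and at least one rise.
--     s = str(i)
--     ups = [a < b for a, b in zip(s, s[1:])]
--     d = ups.count(False)
--     return (all(a != b for a, b in zip(s, s[1:]))
--             and 1 <= d < len(ups)
--             and ups == [False] * d + [True] * (len(ups) - d))
-- ===== Notes on version B (the rewrite author's own statement) =====
-- stated objective: alternative
-- what changed: Replaced A's stateful scan (ok/f flag machine with breaks) by a declarative check: build the list of rise/fall comparisons of adjacent characters, count the falls d, and compare the whole list against the reconstructed canonical valley pattern of d falls followed by rises, also requiring no equal neighbours and at least one fall and at least one rise.
import Mathlib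
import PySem

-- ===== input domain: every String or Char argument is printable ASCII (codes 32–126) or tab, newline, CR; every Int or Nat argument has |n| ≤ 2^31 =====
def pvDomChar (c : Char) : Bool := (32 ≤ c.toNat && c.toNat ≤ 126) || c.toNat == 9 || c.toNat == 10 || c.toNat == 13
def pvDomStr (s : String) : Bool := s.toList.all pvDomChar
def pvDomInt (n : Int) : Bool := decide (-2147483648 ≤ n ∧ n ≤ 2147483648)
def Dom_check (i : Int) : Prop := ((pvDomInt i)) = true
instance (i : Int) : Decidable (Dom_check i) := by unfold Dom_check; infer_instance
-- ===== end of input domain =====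

-- B replaces A's stateful flag-machine scan by a declarative check: build the list of
-- rise/fall comparisons, count the falls d, and compare it to the canonical valley
-- pattern [False]*d ++ [True]*(rest); equivalence is proved on all Int inputs.

-- ===== PORT A =====
-- A's for-loop with break, transliterated as a recursion over j carrying (ok, f).
def checkLoopA (s : List Char) (j : Nat) (f : Bool) : Bool × Bool :=
  if j < s.length then
    let a := s.getD (j - 1) ' '
    let b := s.getD j ' '
    if a > b then
      if !f then (false, f) else checkLoopA s (j + 1) f
    else if a < b then
      if f && j != 1 then checkLoopA s (j + 1) false
      else if j == 1 then (false, f)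
      else checkLoopA s (j + 1) f
    else (false, f)
  else (true, f)
termination_by s.length - j

def check (i : Int) : Bool :=
  let s := (PySem.Int.toStr i).toList
  let r := checkLoopA s 1 true
  r.1 && !r.2

-- ===== PORT B =====
-- ups = [a < b for a, b in zip(s, s[1:])]; d = ups.count(False);
-- return all(a != b ...) and 1 <= d < len(ups) and ups == [False]*d + [True]*(len(ups)-d)
def check_alt (i : Int) : Bool :=
  let s := (PySem.Int.toStr i).toList
  let pairs := s.zip (s.drop 1)
  let ups := pairs.map (fun p => decide (p.1 < p.2))
  let d := ups.count false
  (pairs.all (fun p => p.1 != p.2)) &&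
    (decide (1 ≤ d) && decide (d < ups.length)) &&
    (ups == List.replicate d false ++ List.replicate (ups.length - d) true)

-- ===== PRECONDITION & SPEC =====
def Spec_check (i : Int) (out : Bool) : Prop := out = check_alt i
instance (i : Int) (out : Bool) : Decidable (Spec_check i out) := by unfold Spec_check; infer_instance

-- ===== CLAIM (what is proved, stated in full; the proofs are below) =====
def Claim_equal_check : Prop := ∀ (i : Int), Dom_check i → Spec_check i (check i)

-- ===== LEMMAS AND PROOFS =====

-- A's loop for j ≥ 2, rephrased as a recursion over the list of adjacent pairs
def runA : List (Char × Char) → Bool → Bool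
  | [], f => !f
  | p :: t, f =>
      if p.1 > p.2 then (if f then runA t true else false)
      else if p.1 < p.2 then runA t false
      else false

-- canonical valley pattern test for a boolean (rise) list: falses then all-true
def pat : List Bool → Bool
  | [] => true
  | false :: t => pat t
  | true :: t => t.all (fun x => x)

theorem runA_false (t : List (Char × Char)) :
    runA t false = t.all (fun p => decide (p.1 < p.2)) := by
  induction t with
  | nil => rfl
  | cons q r ih =>
      rcases lt_trichotomy q.1 q.2 with h | h | h
      · simp [runA, h, not_lt.mpr h.le, ih]
      · simp [runA, h]
      · simp [runA, h, not_lt.mpr h.le]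

theorem allup_ne (t : List (Char × Char))
    (h : t.all (fun p => decide (p.1 < p.2)) = true) :
    t.all (fun p => p.1 != p.2) = true := by
  rw [List.all_eq_true] at h ⊢
  intro p hp
  have := h p hp
  simp only [decide_eq_true_eq] at this
  simp [ne_of_lt this]

theorem all_id_eq_count_false (t : List Bool) :
    t.all (fun x => x) = decide (t.count false = 0) := by
  induction t with
  | nil => simp
  | cons b r ih =>
      cases b <;> simp [ih]

theorem replicate_true_beq (t : List Bool) :
    (t == List.replicate t.length true) = t.all (fun x => x) := by
  induction t with
  | nil => rfl
  | cons b r ih =>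
      cases b <;> simp [List.replicate_succ, ih]

theorem pat_iff (u : List Bool) :
    (u == List.replicate (u.count false) false ++
          List.replicate (u.length - u.count false) true) = pat u := by
  induction u with
  | nil => rfl
  | cons b t ih =>
      cases b with
      | false =>
          have hc : (false :: t).count false = t.count false + 1 := by
            simp
          rw [hc]
          simp only [List.replicate_succ, List.cons_append, List.length_cons]
          have hl : t.length + 1 - (t.count false + 1) = t.length - t.count false := by omega
          rw [hl]
          simpa [pat] using ih
      | true =>
          have hc : (true :: t).count false = t.count false := by
            simp
          rw [hc]
          by_cases h0 : t.count false = 0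
          · rw [h0]
            simp only [List.replicate_zero, List.nil_append, List.length_cons]
            have hl : t.length + 1 - 0 = t.length + 1 := by omega
            rw [hl, List.replicate_succ]
            simp [pat, replicate_true_beq]
          · have hpos : 0 < t.count false := Nat.pos_of_ne_zero h0
            obtain ⟨c, hc'⟩ : ∃ c, t.count false = c + 1 := ⟨t.count false - 1, by omega⟩
            rw [hc']
            simp only [List.replicate_succ, List.cons_append]
            have : pat (true :: t) = false := by
              simp only [pat, all_id_eq_count_false]
              simp [hc']
            rw [this]
            simp
  
-- runA with the flag up equals B's declarative tail condition
theorem runA_true_eq (t : List (Char × Char)) :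
    runA t true =
      ((t.all (fun p => p.1 != p.2)) &&
        decide ((t.map (fun p => decide (p.1 < p.2))).count false <
                (t.map (fun p => decide (p.1 < p.2))).length) &&
        pat (t.map (fun p => decide (p.1 < p.2)))) := by
  induction t with
  | nil => simp [runA, pat]
  | cons q r ih =>
      rcases lt_trichotomy q.1 q.2 with h | h | h
      · -- rise: flag goes down, rest must all rise
        have hne : (q.1 != q.2) = true := by simp [ne_of_lt h]
        have hgt : ¬ q.1 > q.2 := not_lt.mpr h.le
        have hle : (r.map (fun p => decide (p.1 < p.2))).count false ≤
            (r.map (fun p => decide (p.1 < p.2))).length := List.count_le_length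
        rw [runA]
        rw [if_neg hgt, if_pos h, runA_false]
        have hu : (q :: r).map (fun p => decide (p.1 < p.2)) =
            true :: r.map (fun p => decide (p.1 < p.2)) := by simp [h]
        rw [hu]
        have hcnt : (true :: r.map (fun p => decide (p.1 < p.2))).count false =
            (r.map (fun p => decide (p.1 < p.2))).count false := by
          simp
        rw [hcnt]
        have hdec : decide ((r.map (fun p => decide (p.1 < p.2))).count false <
            (true :: r.map (fun p => decide (p.1 < p.2))).length) = true := by
          simp only [List.length_cons, decide_eq_true_eq]
          omega
        rw [hdec]
        have hpat : pat (true :: r.map (fun p => decide (p.1 < p.2))) =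
            r.all (fun p => decide (p.1 < p.2)) := by
          simp only [pat, List.all_map, Function.comp_def]
        rw [hpat]
        simp only [List.all_cons, hne, Bool.true_and, Bool.and_true]
        by_cases ha : r.all (fun p => decide (p.1 < p.2)) = true
        · simp [ha, allup_ne r ha]
        · have ha' : r.all (fun p => decide (p.1 < p.2)) = false :=
            Bool.eq_false_iff.mpr ha
          simp [ha']
      · -- equal neighbours: both sides false
        have hne : (q.1 != q.2) = false := by simp [h]
        have h1 : ¬ q.1 > q.2 := by rw [h]; exact lt_irrefl _
        have h2 : ¬ q.1 < q.2 := by rw [h]; exact lt_irrefl _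
        rw [runA]
        simp [if_neg h1, if_neg h2, hne]
      · -- fall: flag stays, recurse
        have hne : (q.1 != q.2) = true := by simp [ne_of_gt h]
        have hlt : ¬ q.1 < q.2 := not_lt.mpr h.le
        rw [runA]
        rw [if_pos h, if_pos rfl, ih]
        have hu : (q :: r).map (fun p => decide (p.1 < p.2)) =
            false :: r.map (fun p => decide (p.1 < p.2)) := by simp [hlt]
        rw [hu]
        have hcnt : (false :: r.map (fun p => decide (p.1 < p.2))).count false =
            (r.map (fun p => decide (p.1 < p.2))).count false + 1 := by
          simp
        rw [hcnt]
        have hdec : decide ((r.map (fun p => decide (p.1 < p.2))).count false + 1 <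
              (false :: r.map (fun p => decide (p.1 < p.2))).length) =
            decide ((r.map (fun p => decide (p.1 < p.2))).count false <
              (r.map (fun p => decide (p.1 < p.2))).length) := by
          simp only [List.length_cons]
          exact decide_eq_decide.mpr (by omega)
        rw [hdec]
        have hpat : pat (false :: r.map (fun p => decide (p.1 < p.2))) =
            pat (r.map (fun p => decide (p.1 < p.2))) := rfl
        rw [hpat]
        simp [List.all_cons, hne]

-- bridge: A's indexed loop (j ≥ 2) equals runA on the dropped pair list
theorem loopA_bridge (s : List Char) (j : Nat) (f : Bool) (hj : 2 ≤ j) :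
    ((checkLoopA s j f).1 && !(checkLoopA s j f).2) =
      runA ((s.zip (s.drop 1)).drop (j - 1)) f := by
  by_cases h : j < s.length
  · have hzl : (s.zip (s.drop 1)).length = s.length - 1 := by
      rw [List.length_zip, List.length_drop]
      omega
    have hidx : j - 1 < (s.zip (s.drop 1)).length := by rw [hzl]; omega
    have hdrop : (s.zip (s.drop 1)).drop (j - 1) =
        (s.zip (s.drop 1))[j - 1] :: (s.zip (s.drop 1)).drop j := by
      have hj1 : j - 1 + 1 = j := by omega
      rw [List.drop_eq_getElem_cons hidx, hj1]
    have h1 : j - 1 < s.length := by omega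
    have h2 : j - 1 < (s.drop 1).length := by simp; omega
    have hget : (s.zip (s.drop 1))[j - 1] = (s[j - 1]'h1, s[j]'h) := by
      rw [List.getElem_zip]
      congr 1
      rw [List.getElem_drop]
      congr 1
      omega
    have hga : s.getD (j - 1) ' ' = s[j - 1]'h1 := List.getD_eq_getElem s ' ' h1
    have hgb : s.getD j ' ' = s[j]'h := List.getD_eq_getElem s ' ' h
    rw [hdrop, hget]
    rcases lt_trichotomy (s[j - 1]'h1) (s[j]'h) with hlt | heq | hgt
    · -- a < b
      have hng : ¬ (s.getD (j - 1) ' ' > s.getD j ' ') := by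
        rw [hga, hgb]; exact not_lt.mpr hlt.le
      have hl : s.getD (j - 1) ' ' < s.getD j ' ' := by rw [hga, hgb]; exact hlt
      have hrun : runA ((s[j-1]'h1, s[j]'h) :: (s.zip (s.drop 1)).drop j) f =
          runA ((s.zip (s.drop 1)).drop j) false := by
        rw [runA]
        simp [not_lt.mpr hlt.le, hlt]
      rw [hrun]
      have hrec := loopA_bridge s (j + 1) false (by omega)
      have hjj : j + 1 - 1 = j := by omega
      rw [hjj] at hrec
      rw [checkLoopA, if_pos h]
      simp only [if_neg hng, if_pos hl]
      by_cases hf : f = true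
      · subst hf
        rw [if_pos (by simp; omega)]
        exact hrec
      · have hf' : f = false := Bool.eq_false_iff.mpr hf
        subst hf'
        rw [if_neg (by simp), if_neg (by simp; omega)]
        exact hrec
    · -- a = b
      have hng : ¬ (s.getD (j - 1) ' ' > s.getD j ' ') := by
        rw [hga, hgb, heq]; exact lt_irrefl _
      have hnl : ¬ (s.getD (j - 1) ' ' < s.getD j ' ') := by
        rw [hga, hgb, heq]; exact lt_irrefl _
      rw [checkLoopA, if_pos h]
      simp only [if_neg hng, if_neg hnl]
      rw [runA]
      simp [heq]
    · -- a > b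
      have hg : s.getD (j - 1) ' ' > s.getD j ' ' := by rw [hga, hgb]; exact hgt
      have hrec := loopA_bridge s (j + 1) f (by omega)
      have hjj : j + 1 - 1 = j := by omega
      rw [hjj] at hrec
      rw [checkLoopA, if_pos h, if_pos hg]
      rw [runA]
      simp only [hgt, if_pos trivial, not_lt.mpr hgt.le]
      by_cases hf : f = true
      · subst hf
        rw [if_neg (by simp)]
        simpa using hrec
      · have hf' : f = false := Bool.eq_false_iff.mpr hf
        subst hf'
        simp
  · have hA : checkLoopA s j f = (true, f) := by rw [checkLoopA, if_neg h]
    have hnil : (s.zip (s.drop 1)).drop (j - 1) = [] := by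
      apply List.drop_eq_nil_of_le
      simp [List.length_zip]
      omega
    rw [hA, hnil, runA]
    simp
termination_by s.length - j
decreasing_by all_goals omega

-- the whole of A (including the special j = 1 step) equals B's declarative body
theorem main_list (s : List Char) :
    ((checkLoopA s 1 true).1 && !(checkLoopA s 1 true).2) =
      (((s.zip (s.drop 1)).all (fun p => p.1 != p.2)) &&
        (decide (1 ≤ ((s.zip (s.drop 1)).map (fun p => decide (p.1 < p.2))).count false) &&
         decide (((s.zip (s.drop 1)).map (fun p => decide (p.1 < p.2))).count false <
                 ((s.zip (s.drop 1)).map (fun p => decide (p.1 < p.2))).length)) &&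
        (((s.zip (s.drop 1)).map (fun p => decide (p.1 < p.2))) ==
          List.replicate (((s.zip (s.drop 1)).map (fun p => decide (p.1 < p.2))).count false) false ++
          List.replicate (((s.zip (s.drop 1)).map (fun p => decide (p.1 < p.2))).length -
            ((s.zip (s.drop 1)).map (fun p => decide (p.1 < p.2))).count false) true)) := by
  rw [pat_iff]
  by_cases h : 1 < s.length
  · have h0 : 0 < s.length := by omega
    have hzl : (s.zip (s.drop 1)).length = s.length - 1 := by
      rw [List.length_zip, List.length_drop]
      omega
    have hidx : 0 < (s.zip (s.drop 1)).length := by rw [hzl]; omega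
    have h2 : 0 < (s.drop 1).length := by simp; omega
    have hget0 : (s.zip (s.drop 1))[0]'hidx = (s[0]'h0, s[1]'h) := by
      rw [List.getElem_zip]
      congr 1
      rw [List.getElem_drop]
    have hL : s.zip (s.drop 1) = (s[0]'h0, s[1]'h) :: (s.zip (s.drop 1)).drop 1 := by
      have hd := List.drop_eq_getElem_cons (l := s.zip (s.drop 1)) (i := 0) hidx
      simpa [hget0] using hd
    have hga : s.getD (1 - 1) ' ' = s[0]'h0 := by
      simpa using List.getD_eq_getElem s ' ' h0
    have hgb : s.getD 1 ' ' = s[1]'h := List.getD_eq_getElem s ' ' h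
    rcases lt_trichotomy (s[0]'h0) (s[1]'h) with hlt | heq | hgt
    · -- first step rises: A breaks with ok = False
      have hA : checkLoopA s 1 true = (false, true) := by
        rw [checkLoopA, if_pos h]
        simp only [hga, hgb]
        rw [if_neg (not_lt.mpr hlt.le), if_pos hlt]
        simp
      rw [hA, hL]
      have hup : decide ((s[0]'h0) < (s[1]'h)) = true := by simp [hlt]
      by_cases hz : (((s.zip (s.drop 1)).drop 1).map (fun p => decide (p.1 < p.2))).count false = 0
      · have hd1 : decide (1 ≤ (((s[0]'h0, s[1]'h) :: (s.zip (s.drop 1)).drop 1).map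
            (fun p => decide (p.1 < p.2))).count false) = false := by
          simp only [List.map_cons, hup, List.count_cons, hz]
          decide
        rw [hd1]
        simp
      · have hp : pat (((s[0]'h0, s[1]'h) :: (s.zip (s.drop 1)).drop 1).map
            (fun p => decide (p.1 < p.2))) = false := by
          simp only [List.map_cons, hup, pat, all_id_eq_count_false]
          exact decide_eq_false hz
        rw [hp]
        simp
    · -- equal first characters: A breaks with ok = False
      have hA : checkLoopA s 1 true = (false, true) := by
        rw [checkLoopA, if_pos h]
        simp only [hga, hgb]
        rw [if_neg (by rw [heq]; exact lt_irrefl _), if_neg (by rw [heq]; exact lt_irrefl _)]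
      rw [hA, hL]
      have hne : ((s[0]'h0) != (s[1]'h)) = false := by simp [heq]
      simp [hne]
    · -- first step falls: A continues from j = 2 with the flag up
      have hA1 : checkLoopA s 1 true = checkLoopA s 2 true := by
        rw [checkLoopA, if_pos h]
        simp only [hga, hgb]
        rw [if_pos hgt, if_neg (by simp)]
      have hb := loopA_bridge s 2 true (le_refl 2)
      have h21 : (2 : Nat) - 1 = 1 := rfl
      rw [h21] at hb
      rw [hA1, hb, runA_true_eq, hL]
      have hup : decide ((s[0]'h0) < (s[1]'h)) = false := by
        simp [not_lt.mpr hgt.le]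
      have hne : ((s[0]'h0) != (s[1]'h)) = true := by simp [ne_of_gt hgt]
      simp only [List.drop_succ_cons, List.drop_zero, List.map_cons,
        List.all_cons, hup, hne, Bool.true_and, List.count_cons,
        List.length_cons, pat]
      have hdec1 : decide (1 ≤ (((s.zip (s.drop 1)).drop 1).map
          (fun p => decide (p.1 < p.2))).count false + 1) = true := by
        simp
      have hdec2 : decide ((((s.zip (s.drop 1)).drop 1).map
            (fun p => decide (p.1 < p.2))).count false + 1 <
          (((s.zip (s.drop 1)).drop 1).map (fun p => decide (p.1 < p.2))).length + 1) =
          decide ((((s.zip (s.drop 1)).drop 1).map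
            (fun p => decide (p.1 < p.2))).count false <
          (((s.zip (s.drop 1)).drop 1).map (fun p => decide (p.1 < p.2))).length) :=
        decide_eq_decide.mpr (by omega)
      have hif : (if (false == false) = true then 1 else 0) = 1 := rfl
      rw [hif, hdec1, hdec2, Bool.true_and]
      rfl
  · -- len(s) ≤ 1: no adjacent pair, both sides False
    have hA : checkLoopA s 1 true = (true, true) := by rw [checkLoopA, if_neg h]
    have hLnil : s.zip (s.drop 1) = [] := by
      have hl0 : (s.zip (s.drop 1)).length = 0 := by
        rw [List.length_zip, List.length_drop]
        omega
      exact List.eq_nil_of_length_eq_zero hl0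
    rw [hA, hLnil]
    simp [pat]

-- ===== VERDICT (by name: the statement is the Claim_ definition above) =====
theorem check_spec : Claim_equal_check := by
  intro i _
  unfold Spec_check check check_alt
  exact main_list _
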